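-- pv_equiv track=rewrite | github.com/yonghee12/algorithm_study | programmers-2020-april/level3/kakao_64064_불량 사용자.py | gotcha
-- ===== SOURCE A (Python) =====
-- def gotcha(user_id_list, ban_id):
--     res = []
--     for user in user_id_list:
--         if len(user) != len(ban_id):
--             continue
--         elif ban_id == '*' * len(ban_id):
--             if len(ban_id) == len(user):
--                 res.append(user)
--             continue
--         got = True
--         for b, u in zip(ban_id, user):
--             if b == '*':
--                 continue
--             if b != u:
--                 got = False
--                 break
--         if got:
--             res.append(user)
--     return res
-- ===== SOURCE B (Python) =====
-- import re
--
-- def gotcha(user_id_list, ban_id):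
--     pattern = ''.join('.' if c == '*' else re.escape(c) for c in ban_id)
--     rx = re.compile(pattern, re.DOTALL)
--     return [u for u in user_id_list if rx.fullmatch(u)]
-- ===== Notes on version B (the rewrite author's own statement) =====
-- stated objective: idiomatic
-- what changed: B compiles ban_id once into a regex ('.' for each '*', re.escape for literals) and filters with re.fullmatch under DOTALL, replacing A's explicit per-user character loop with 'got' flag and its special all-star branch.
import Mathlib
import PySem

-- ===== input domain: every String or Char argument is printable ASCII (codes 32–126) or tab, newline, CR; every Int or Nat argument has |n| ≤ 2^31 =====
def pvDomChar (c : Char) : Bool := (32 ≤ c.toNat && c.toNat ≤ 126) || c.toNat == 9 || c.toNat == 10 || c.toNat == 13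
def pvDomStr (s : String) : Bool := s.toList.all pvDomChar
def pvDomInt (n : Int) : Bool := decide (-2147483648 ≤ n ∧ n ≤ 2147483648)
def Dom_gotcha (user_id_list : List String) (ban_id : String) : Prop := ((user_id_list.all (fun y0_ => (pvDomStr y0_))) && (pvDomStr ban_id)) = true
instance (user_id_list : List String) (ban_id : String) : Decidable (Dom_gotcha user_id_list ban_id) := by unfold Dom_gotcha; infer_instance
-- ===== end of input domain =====

-- B replaces A's flagged double loop and all-star special case by compiling ban_id to a
-- regex ('.' for '*', re.escape otherwise) and delegating to re.fullmatch (idiomatic).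

-- ===== PORT A =====
-- inner 'for b, u in zip(...)' loop with its 'got' flag and break
def gotchaInner : List (Char × Char) → Bool
  | [] => true
  | (b, u) :: rest =>
    if b = '*' then gotchaInner rest
    else if b ≠ u then false
    else gotchaInner rest

def gotcha (user_id_list : List String) (ban_id : String) : List String :=
  user_id_list.foldl (fun res user =>
    if user.toList.length ≠ ban_id.toList.length then res
    else if ban_id.toList = List.replicate ban_id.toList.length '*' then
      (if ban_id.toList.length = user.toList.length then res ++ [user] else res)
    else if gotchaInner (ban_id.toList.zip user.toList) then res ++ [user] else res) []

-- ===== PORT B =====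
-- re.escape (Python 3.11): prefixes '\' to exactly these characters
def pyReEscapeSpecial (c : Char) : Bool :=
  c ∈ [' ', '#', '$', '&', '(', ')', '*', '+', '-', '.', '?', '[', '\\', ']', '^',
       '{', '|', '}', '~', '\t', '\n', '\r', '\x0b', '\x0c']

def pyReEscape (c : Char) : List Char :=
  if pyReEscapeSpecial c then ['\\', c] else [c]

-- pattern = ''.join('.' if c == '*' else re.escape(c) for c in ban_id)
def buildPattern (ban : List Char) : List Char :=
  ban.flatMap (fun c => if c = '*' then ['.'] else pyReEscape c)

-- rx.fullmatch(u) with re.DOTALL, ported as a hand-written matcher; exact for the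
-- patterns buildPattern produces (sequences of '.', '\'-escaped literals, and
-- non-special literal characters — no quantifiers/classes ever occur)
def reFullmatch : List Char → List Char → Bool
  | [], s => s.isEmpty
  | '\\' :: c :: p', u :: s' => (c == u) && reFullmatch p' s'
  | '\\' :: _, _ => false
  | p0 :: p, u :: s' => (p0 == '.' || p0 == u) && reFullmatch p s'
  | _ :: _, [] => false

def gotcha_alt (user_id_list : List String) (ban_id : String) : List String :=
  user_id_list.filter (fun u => reFullmatch (buildPattern ban_id.toList) u.toList)

-- ===== PRECONDITION & SPEC =====
def Spec_gotcha (user_id_list : List String) (ban_id : String) (out : List String) : Prop := out = gotcha_alt user_id_list ban_id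
instance (user_id_list : List String) (ban_id : String) (out : List String) : Decidable (Spec_gotcha user_id_list ban_id out) := by unfold Spec_gotcha; infer_instance

-- ===== CLAIM (what is proved, stated in full; the proofs are below) =====
def Claim_equal_gotcha : Prop := ∀ (user_id_list : List String) (ban_id : String), Dom_gotcha user_id_list ban_id → Spec_gotcha user_id_list ban_id (gotcha user_id_list ban_id)

-- ===== LEMMAS AND PROOFS =====

-- the matcher on a compiled pattern = length check + A's inner zip loop
theorem reFullmatch_buildPattern (ban u : List Char) :
    reFullmatch (buildPattern ban) u =
      (decide (u.length = ban.length) && gotchaInner (ban.zip u)) := by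
  induction ban generalizing u with
  | nil => cases u <;> rfl
  | cons c bs ih =>
    by_cases hstar : c = '*'
    · subst hstar
      cases u with
      | nil => simp [buildPattern, reFullmatch]
      | cons x xs =>
        simp only [buildPattern, List.flatMap_cons] at ih ⊢
        simp [reFullmatch, gotchaInner, ih xs]
    · by_cases hesc : pyReEscapeSpecial c
      · cases u with
        | nil =>
          simp [buildPattern, reFullmatch, hstar, pyReEscape, hesc]
        | cons x xs =>
          simp only [buildPattern, List.flatMap_cons, if_neg hstar, pyReEscape,
            if_pos hesc] at ih ⊢
          by_cases hcx : c = x <;>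
            simp [reFullmatch, gotchaInner, ih xs, hstar, hcx]
      · have hcdot : c ≠ '.' := by intro h; subst h; exact hesc (by decide)
        have hcbs : c ≠ '\\' := by intro h; subst h; exact hesc (by decide)
        cases u with
        | nil =>
          simp [buildPattern, reFullmatch, hstar, pyReEscape, hesc]
        | cons x xs =>
          simp only [buildPattern, List.flatMap_cons, if_neg hstar, pyReEscape,
            if_neg hesc] at ih ⊢
          rw [reFullmatch.eq_def]
          by_cases hcx : c = x <;>
            · split <;> simp_all [gotchaInner]

-- when ban_id is all stars, A's inner loop succeeds too
theorem gotchaInner_replicate_star (n : ℕ) (u : List Char) :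
    gotchaInner ((List.replicate n '*').zip u) = true := by
  induction n generalizing u with
  | zero => simp [gotchaInner]
  | succ k ih =>
    cases u with
    | nil => simp [gotchaInner]
    | cons x xs => simpa [List.replicate_succ, gotchaInner] using ih xs

-- A's per-user branch chain decides exactly B's regex test
theorem gotcha_step (ban user : String) (res : List String) :
    (if user.toList.length ≠ ban.toList.length then res
     else if ban.toList = List.replicate ban.toList.length '*' then
       (if ban.toList.length = user.toList.length then res ++ [user] else res)
     else if gotchaInner (ban.toList.zip user.toList) then res ++ [user] else res)
    = (if reFullmatch (buildPattern ban.toList) user.toList then res ++ [user] else res) := by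
  rw [reFullmatch_buildPattern]
  simp only [ne_eq, String.length_toList]
  by_cases hlen : user.length = ban.length
  · by_cases hall : ban.toList = List.replicate ban.length '*'
    · simp [hlen, hall, gotchaInner_replicate_star]
    · simp [hlen, hall]
  · simp [hlen]

-- pointwise-equal folding functions fold alike
theorem foldl_ext_fun {α β : Type} (f g : β → α → β) (xs : List α) (b : β)
    (h : ∀ r a, f r a = g r a) : xs.foldl f b = xs.foldl g b := by
  induction xs generalizing b with
  | nil => rfl
  | cons x xs ih => simp [List.foldl_cons, h, ih]

-- foldl with conditional append = filter
theorem foldl_filter_append {α : Type} (P : α → Bool) (xs acc : List α) :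
    xs.foldl (fun r a => if P a then r ++ [a] else r) acc = acc ++ xs.filter P := by
  induction xs generalizing acc with
  | nil => simp
  | cons x xs ih =>
    by_cases h : P x <;> simp [h, ih]

-- ===== VERDICT (by name: the statement is the Claim_ definition above) =====
theorem gotcha_spec : Claim_equal_gotcha := by
  intro user_id_list ban_id _
  show gotcha user_id_list ban_id = gotcha_alt user_id_list ban_id
  unfold gotcha gotcha_alt
  have hstep : ∀ (res : List String) (user : String),
      (if user.toList.length ≠ ban_id.toList.length then res
       else if ban_id.toList = List.replicate ban_id.toList.length '*' then
         (if ban_id.toList.length = user.toList.length then res ++ [user] else res)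
       else if gotchaInner (ban_id.toList.zip user.toList) then res ++ [user] else res)
      = (if reFullmatch (buildPattern ban_id.toList) user.toList then res ++ [user] else res) :=
    fun res user => gotcha_step ban_id user res
  rw [foldl_ext_fun _
        (fun r u => if reFullmatch (buildPattern ban_id.toList) u.toList then r ++ [u] else r)
        user_id_list [] hstep]
  simpa using foldl_filter_append
    (fun u => reFullmatch (buildPattern ban_id.toList) u.toList) user_id_list []
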